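-- pv_equiv track=rewrite | github.com/robin-scharf/gapbf | src/gapbf/Config.py | merge_prefix_suffix
-- ===== SOURCE A (Python) =====
-- def merge_prefix_suffix(path_prefix: list[str], path_suffix: list[str]) -> list[str] | None:
--     """Merge prefix and suffix constraints if they can describe a valid path."""
--     if not path_prefix:
--         return list(path_suffix)
--     if not path_suffix:
--         return list(path_prefix)
--
--     max_overlap = min(len(path_prefix), len(path_suffix))
--     for overlap in range(max_overlap, -1, -1):
--         if overlap and path_prefix[-overlap:] != path_suffix[:overlap]:
--             continue
--
--         merged = path_prefix + path_suffix[overlap:]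
--         if len(merged) == len(set(merged)):
--             return merged
--
--     return None
-- ===== SOURCE B (Python) =====
-- def merge_prefix_suffix(path_prefix: list[str], path_suffix: list[str]) -> list[str] | None:
--     """Merge prefix and suffix constraints if they can describe a valid path.
--
--     O(n): any merge contains all of path_prefix, so path_prefix must be duplicate-free;
--     then the first suffix element pins down the unique possible positive overlap.
--     """
--     if not path_prefix:
--         return list(path_suffix)
--     if not path_suffix:
--         return list(path_prefix)
--
--     if len(set(path_prefix)) != len(path_prefix):
--         return None  # every merge contains all of path_prefix
--
--     best = 0
--     if path_suffix[0] in path_prefix: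
--         pos = path_prefix.index(path_suffix[0])
--         o = len(path_prefix) - pos
--         if o <= len(path_suffix) and path_prefix[pos:] == path_suffix[:o]:
--             best = o
--
--     merged = path_prefix + path_suffix[best:]
--     if len(set(merged)) == len(merged):
--         return merged
--     return None
-- ===== Notes on version B (the rewrite author's own statement) =====
-- stated objective: faster
-- what changed: A tries every overlap descending, slicing and building a fresh set per candidate; B does one linear pass: since any merge contains all of path_prefix, path_prefix must be duplicate-free, and then path_suffix[0] pins down the single possible positive overlap via one index lookup, so only one slice comparison and one set build remain.
import Mathlib
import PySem

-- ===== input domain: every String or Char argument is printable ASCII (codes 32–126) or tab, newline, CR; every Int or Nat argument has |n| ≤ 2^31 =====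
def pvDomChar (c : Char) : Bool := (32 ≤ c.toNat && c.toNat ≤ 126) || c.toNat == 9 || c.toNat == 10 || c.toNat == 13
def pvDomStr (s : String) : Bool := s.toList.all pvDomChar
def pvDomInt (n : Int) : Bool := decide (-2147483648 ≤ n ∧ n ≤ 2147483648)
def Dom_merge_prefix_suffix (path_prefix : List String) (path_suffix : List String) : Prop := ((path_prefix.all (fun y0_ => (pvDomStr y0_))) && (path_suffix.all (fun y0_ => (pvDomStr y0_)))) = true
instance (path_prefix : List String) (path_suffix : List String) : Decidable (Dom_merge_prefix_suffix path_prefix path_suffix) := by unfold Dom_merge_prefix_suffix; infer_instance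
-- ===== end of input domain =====

-- B replaces A's descending trial of every overlap (slice + fresh set each round, O(n^2))
-- by one O(n) pass: a merge always contains all of path_prefix, so path_prefix must be
-- duplicate-free, and then suffix[0] pins down the single possible positive overlap.

-- ===== PORT A =====
-- the for-loop of A over range(max_overlap, -1, -1), with 'continue' and early 'return'
def pvALoop (p s : List String) : List Int → Option (List String)
  | [] => none
  | o :: rest =>
    if o ≠ 0 ∧ PySem.List.slice p (some (-o)) none ≠ PySem.List.slice s none (some o) then
      pvALoop p s rest
    else
      let merged := p ++ PySem.List.slice s (some o) none
      if merged.length = (PySem.Set.ofList merged).length then some merged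
      else pvALoop p s rest

def merge_prefix_suffix (path_prefix : List String) (path_suffix : List String) : Option (List String) :=
  if path_prefix = [] then some path_suffix
  else if path_suffix = [] then some path_prefix
  else
    pvALoop path_prefix path_suffix
      (PySem.List.pyRange ((min path_prefix.length path_suffix.length : ℕ) : Int) (-1) (-1))

-- ===== PORT B =====
def merge_prefix_suffix_alt (path_prefix : List String) (path_suffix : List String) : Option (List String) :=
  if path_prefix = [] then some path_suffix
  else if path_suffix = [] then some path_prefix
  else if (PySem.Set.ofList path_prefix).length ≠ path_prefix.length then none
  else
    let h0 := PySem.List.pyGetD path_suffix 0 ""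
    let best : Int :=
      if h0 ∈ path_prefix then
        let pos : Int := ((PySem.List.index? path_prefix h0).getD 0 : ℕ)
        let o : Int := (path_prefix.length : Int) - pos
        if o ≤ (path_suffix.length : Int) ∧
            PySem.List.slice path_prefix (some pos) none = PySem.List.slice path_suffix none (some o)
        then o else 0
      else 0
    let merged := path_prefix ++ PySem.List.slice path_suffix (some best) none
    if (PySem.Set.ofList merged).length = merged.length then some merged else none

-- ===== PRECONDITION & SPEC =====
def Spec_merge_prefix_suffix (path_prefix : List String) (path_suffix : List String) (out : Option (List String)) : Prop := out = merge_prefix_suffix_alt path_prefix path_suffix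
instance (path_prefix : List String) (path_suffix : List String) (out : Option (List String)) : Decidable (Spec_merge_prefix_suffix path_prefix path_suffix out) := by unfold Spec_merge_prefix_suffix; infer_instance

-- ===== CLAIM (what is proved, stated in full; the proofs are below) =====
def Claim_equal_merge_prefix_suffix : Prop := ∀ (path_prefix : List String) (path_suffix : List String), Dom_merge_prefix_suffix path_prefix path_suffix → Spec_merge_prefix_suffix path_prefix path_suffix (merge_prefix_suffix path_prefix path_suffix)

-- ===== LEMMAS AND PROOFS =====

-- o is a valid overlap: the last o elements of p equal the first o elements of s
def pvValid (p s : List String) (o : ℕ) : Prop := p.drop (p.length - o) = s.take o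

lemma pvValid_zero (p s : List String) : pvValid p s 0 := by
  simp [pvValid]

lemma pvOk_mono (p s : List String) {o o' : ℕ} (h : o ≤ o') (hok : (p ++ s.drop o).Nodup) :
    (p ++ s.drop o').Nodup := by
  have hdd : s.drop o' = (s.drop o).drop (o' - o) := by
    rw [List.drop_drop]; congr 1; omega
  rw [hdd]
  exact hok.sublist ((List.append_sublist_append_left p).mpr (List.drop_sublist _ _))

lemma pvOfList_sublist {α : Type} [BEq α] [LawfulBEq α] (xs acc : List α) :
    (xs.foldl PySem.Set.add acc).Sublist (acc ++ xs) := by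
  induction xs generalizing acc with
  | nil => simp
  | cons x xs ih =>
    simp only [List.foldl_cons]
    refine (ih (PySem.Set.add acc x)).trans ?_
    rw [PySem.Set.add_eq_ite]
    split
    · exact (List.append_sublist_append_left acc).mpr (List.sublist_cons_self _ _)
    · simp

lemma pvLenSet (xs : List String) :
    (PySem.Set.ofList xs).length = xs.length ↔ xs.Nodup := by
  constructor
  · intro h
    have hsub : (PySem.Set.ofList xs).Sublist xs := by
      simpa using pvOfList_sublist xs []
    have := hsub.eq_of_length h
    rw [← this]; exact PySem.Set.nodup_ofList xs
  · intro h
    rw [PySem.Set.ofList_eq_self_of_nodup xs h]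

-- A's loop returns none when every valid overlap it scans fails the uniqueness test
lemma pvALoop_none (p s : List String) (k : ℕ) (hk : k ≤ min p.length s.length)
    (h : ∀ o, o ≤ k → pvValid p s o → ¬ (p ++ s.drop o).Nodup) :
    pvALoop p s (PySem.List.pyRange (k : Int) (-1) (-1)) = none := by
  induction k with
  | zero =>
    rw [PySem.List.pyRange_neg_one_cons (by norm_num), PySem.List.pyRange_neg_one_eq_nil (by norm_num)]
    simp only [pvALoop]
    rw [if_neg (by simp)]
    rw [PySem.List.slice_from_natCast]
    split
    · rename_i hlen
      exact absurd ((pvLenSet _).mp hlen.symm)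
        (by simpa using h 0 le_rfl (pvValid_zero p s))
    · rfl
  | succ n ih =>
    rw [PySem.List.pyRange_neg_one_cons (by push_cast; omega)]
    have hrest : ((n + 1 : ℕ) : Int) - 1 = ((n : ℕ) : Int) := by omega
    simp only [pvALoop]
    have hslp : PySem.List.slice p (some (-((n + 1 : ℕ) : Int))) none
        = p.drop (p.length - (n + 1)) :=
      PySem.List.slice_from_neg_natCast p (n + 1) (by omega)
    have hsls : PySem.List.slice s none (some ((n + 1 : ℕ) : Int)) = s.take (n + 1) :=
      PySem.List.slice_to_natCast s (n + 1)
    by_cases hv : pvValid p s (n + 1)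
    · rw [if_neg (by rw [hslp, hsls]; simp [pvValid] at hv; simp [hv])]
      rw [PySem.List.slice_from_natCast]
      split
      · rename_i hlen
        exact absurd ((pvLenSet _).mp hlen.symm)
          (by simpa using h (n + 1) le_rfl hv)
      · rw [hrest]; exact ih (by omega) (fun o ho => h o (by omega))
    · rw [if_pos ⟨by positivity, by rw [hslp, hsls]; simpa [pvValid] using hv⟩]
      rw [hrest]; exact ih (by omega) (fun o ho => h o (by omega))

-- A's loop from k, when b is the largest valid overlap ≤ k
lemma pvALoop_run (p s : List String) (b k : ℕ) (hb : b ≤ k)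
    (hk : k ≤ min p.length s.length)
    (hvb : pvValid p s b) (hmax : ∀ o, b < o → o ≤ k → ¬ pvValid p s o) :
    pvALoop p s (PySem.List.pyRange (k : Int) (-1) (-1)) =
      if (p ++ s.drop b).Nodup then some (p ++ s.drop b) else none := by
  induction k with
  | zero =>
    have hb0 : b = 0 := by omega
    subst hb0
    rw [PySem.List.pyRange_neg_one_cons (by norm_num), PySem.List.pyRange_neg_one_eq_nil (by norm_num)]
    simp only [pvALoop]
    rw [if_neg (by simp)]
    rw [PySem.List.slice_from_natCast]
    split
    · rename_i hlen
      rw [if_pos (by simpa using (pvLenSet _).mp hlen.symm)]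
    · rename_i hlen
      rw [if_neg (fun hok => hlen (((pvLenSet _).mpr (by simpa using hok)).symm))]
  | succ n ih =>
    by_cases hbk : b = n + 1
    · subst hbk
      rw [PySem.List.pyRange_neg_one_cons (by push_cast; omega)]
      have hrest : ((n + 1 : ℕ) : Int) - 1 = ((n : ℕ) : Int) := by omega
      simp only [pvALoop]
      have hslp : PySem.List.slice p (some (-((n + 1 : ℕ) : Int))) none
          = p.drop (p.length - (n + 1)) :=
        PySem.List.slice_from_neg_natCast p (n + 1) (by omega)
      have hsls : PySem.List.slice s none (some ((n + 1 : ℕ) : Int)) = s.take (n + 1) :=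
        PySem.List.slice_to_natCast s (n + 1)
      rw [if_neg (by rw [hslp, hsls]; simp [pvValid] at hvb; simp [hvb])]
      rw [PySem.List.slice_from_natCast]
      split
      · rename_i hlen
        rw [if_pos (by simpa using (pvLenSet _).mp hlen.symm)]
      · rename_i hlen
        have hnok : ¬ (p ++ s.drop (n + 1)).Nodup :=
          fun hok => hlen (((pvLenSet _).mpr (by simpa using hok)).symm)
        rw [if_neg hnok, hrest]
        exact pvALoop_none p s n (by omega)
          (fun o ho hv hok => hnok (pvOk_mono p s (by omega) hok))
    · rw [PySem.List.pyRange_neg_one_cons (by push_cast; omega)]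
      have hrest : ((n + 1 : ℕ) : Int) - 1 = ((n : ℕ) : Int) := by omega
      simp only [pvALoop]
      have hslp : PySem.List.slice p (some (-((n + 1 : ℕ) : Int))) none
          = p.drop (p.length - (n + 1)) :=
        PySem.List.slice_from_neg_natCast p (n + 1) (by omega)
      have hsls : PySem.List.slice s none (some ((n + 1 : ℕ) : Int)) = s.take (n + 1) :=
        PySem.List.slice_to_natCast s (n + 1)
      have hnv : ¬ pvValid p s (n + 1) := hmax (n + 1) (by omega) le_rfl
      rw [if_pos ⟨by positivity, by rw [hslp, hsls]; simpa [pvValid] using hnv⟩]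
      rw [hrest]
      exact ih (by omega) (by omega) (fun o ho1 ho2 => hmax o ho1 (by omega))

-- a positive valid overlap forces s[0] ∈ p (at position p.length - o)
lemma pvValid_pos_getElem (p s : List String) (o : ℕ) (ho : 1 ≤ o)
    (hop : o ≤ p.length) (hv : pvValid p s o)
    (hs0 : 0 < s.length) :
    ∃ (h : p.length - o < p.length), p[p.length - o] = s[0] := by
  refine ⟨by omega, ?_⟩
  have h0 : (p.drop (p.length - o))[0]'(by simp; omega) = (s.take o)[0]'(by simp; omega) := by
    simp only [pvValid] at hv
    simp [hv]
  simpa using h0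

-- positive valid overlaps are unique when p has no duplicates: s[0] pins the position
lemma pvValid_unique (p s : List String) (hnd : p.Nodup) (hs0 : 0 < s.length)
    (j : ℕ) (hj : j < p.length) (hpj : p[j] = s[0]'(hs0))
    (o : ℕ) (ho : 1 ≤ o) (hom : o ≤ min p.length s.length) (hv : pvValid p s o) :
    o = p.length - j := by
  obtain ⟨h, hget⟩ := pvValid_pos_getElem p s o ho (by omega) hv hs0
  have : p.length - o = j :=
    (List.Nodup.getElem_inj_iff hnd).mp (by rw [hget, hpj])
  omega

-- ===== VERDICT (by name: the statement is the Claim_ definition above) =====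
theorem merge_prefix_suffix_spec : Claim_equal_merge_prefix_suffix := by
  intro p s _
  unfold Spec_merge_prefix_suffix merge_prefix_suffix merge_prefix_suffix_alt
  by_cases hp : p = []
  · simp [hp]
  by_cases hs : s = []
  · simp [hp, hs]
  rw [if_neg hp, if_neg hs, if_neg hp, if_neg hs]
  have hs0 : 0 < s.length := List.length_pos_of_ne_nil hs
  have hp0 : 0 < p.length := List.length_pos_of_ne_nil hp
  by_cases hnd : p.Nodup
  case neg =>
    rw [if_pos (fun h => hnd ((pvLenSet p).mp h))]
    exact pvALoop_none p s (min p.length s.length) le_rfl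
      (fun o ho hv hok => hnd hok.of_append_left)
  case pos =>
    rw [if_neg (by simp [(pvLenSet p).mpr hnd])]
    have hh0 : PySem.List.pyGetD s 0 "" = s[0] := by
      rw [PySem.List.pyGetD_zero]
      exact List.getD_eq_getElem s "" hs0
    simp only []
    by_cases hmem : PySem.List.pyGetD s 0 "" ∈ p
    case neg =>
      rw [if_neg hmem]
      rw [pvALoop_run p s 0 (min p.length s.length) (by omega) le_rfl (pvValid_zero p s)
        (fun o ho hom hv => by
          obtain ⟨h, hget⟩ := pvValid_pos_getElem p s o ho (by omega) hv hs0
          exact hmem (by rw [hh0, ← hget]; exact List.mem_of_getElem rfl))]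
      rw [PySem.List.slice_zero_start, PySem.List.slice_none_none]
      by_cases hok : (p ++ s).Nodup
      · rw [if_pos (by simpa using hok), if_pos ((pvLenSet _).mpr hok)]
        simp
      · rw [if_neg (by simpa using hok), if_neg (fun h => hok ((pvLenSet _).mp h))]
    case pos =>
      rw [if_pos hmem]
      obtain ⟨j, hj⟩ : ∃ j, PySem.List.index? p (PySem.List.pyGetD s 0 "") = some j :=
        Option.isSome_iff_exists.mp ((PySem.List.index?_isSome_iff _ _).mpr hmem)
      obtain ⟨hjl, hpj, -⟩ := PySem.List.getElem_of_index?_eq_some hj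
      rw [hj]
      simp only [Option.getD_some]
      have hcast : (p.length : Int) - (j : ℕ) = ((p.length - j : ℕ) : Int) := by omega
      rw [hcast, PySem.List.slice_from_natCast, PySem.List.slice_to_natCast]
      have hdropj : List.drop j p = List.drop (p.length - (p.length - j)) p := by congr 1; omega
      by_cases hc : (p.length - j : ℕ) ≤ s.length ∧ pvValid p s (p.length - j)
      · have hcond : ((p.length - j : ℕ) : Int) ≤ (s.length : Int) ∧
            List.drop j p = List.take (p.length - j) s := by
          refine ⟨by exact_mod_cast hc.1, ?_⟩
          rw [hdropj]; exact hc.2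
        rw [if_pos hcond]
        rw [pvALoop_run p s (p.length - j) (min p.length s.length) (by omega) le_rfl hc.2
          (fun o ho hom hv => by
            have := pvValid_unique p s hnd hs0 j hjl (by rw [← hh0]; exact hpj) o (by omega) hom hv
            omega)]
        rw [PySem.List.slice_from_natCast]
        by_cases hok : (p ++ s.drop (p.length - j)).Nodup
        · rw [if_pos hok, if_pos ((pvLenSet _).mpr hok)]
        · rw [if_neg hok, if_neg (fun h => hok ((pvLenSet _).mp h))]
      · have hncond : ¬ (((p.length - j : ℕ) : Int) ≤ (s.length : Int) ∧
            List.drop j p = List.take (p.length - j) s) := by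
          intro h
          exact hc ⟨by exact_mod_cast h.1, by unfold pvValid; rw [← hdropj]; exact h.2⟩
        rw [if_neg hncond]
        rw [pvALoop_run p s 0 (min p.length s.length) (by omega) le_rfl (pvValid_zero p s)
          (fun o ho hom hv => by
            have heq := pvValid_unique p s hnd hs0 j hjl (by rw [← hh0]; exact hpj) o (by omega) hom hv
            exact hc ⟨by omega, heq ▸ hv⟩)]
        rw [PySem.List.slice_zero_start, PySem.List.slice_none_none]
        by_cases hok : (p ++ s).Nodup
        · rw [if_pos (by simpa using hok), if_pos ((pvLenSet _).mpr hok)]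
          simp
        · rw [if_neg (by simpa using hok), if_neg (fun h => hok ((pvLenSet _).mp h))]
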